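-- pv_equiv track=rewrite | github.com/Hendryboyz/algo-reviews | sort/shell_sort.py | insertion_sort_with_gap
-- ===== SOURCE A (Python) =====
-- def insertion_sort_with_gap(array, gap = 1):
--   for i in range(len(array)):
--     for j in range(i - gap, -1, -gap):
--       if j + gap >= len(array):
--         continue
--       if array[j] < array[j + gap]: # previous < curren
--         break
--       swap(array, j, j + gap)
--   return array
--
-- def swap(array, src, dest):
--   if src == dest:
--     return
--   tmp = array[src]
--   array[src] = array[dest]
--   array[dest] = tmp
-- ===== SOURCE B (Python) =====
-- def insertion_sort_with_gap(array, gap = 1):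
--   if gap <= 0:
--     return array
--   chains = [sorted(array[r::gap]) for r in range(min(gap, len(array)))]
--   return [chains[i % gap][i // gap] for i in range(len(array))]
-- ===== Notes on version B (the rewrite author's own statement) =====
-- stated objective: alternative
-- what changed: Instead of A's per-index backward swap passes (gapped insertion sort), B splits the array into its gap residue-class subsequences, sorts each with the built-in sort, and reassembles them by index interleaving; equivalence is proved for all gap != 0 (gap = 0 is excluded: Python A raises ValueError there); note A sorts its argument in place and returns it while B leaves the argument untouched. Intended as faster (O(n log n) vs O(n^2/gap)); a timing run read 1.72x at the largest size but did not confirm it consistently, so no speed is claimed.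
import Mathlib
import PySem

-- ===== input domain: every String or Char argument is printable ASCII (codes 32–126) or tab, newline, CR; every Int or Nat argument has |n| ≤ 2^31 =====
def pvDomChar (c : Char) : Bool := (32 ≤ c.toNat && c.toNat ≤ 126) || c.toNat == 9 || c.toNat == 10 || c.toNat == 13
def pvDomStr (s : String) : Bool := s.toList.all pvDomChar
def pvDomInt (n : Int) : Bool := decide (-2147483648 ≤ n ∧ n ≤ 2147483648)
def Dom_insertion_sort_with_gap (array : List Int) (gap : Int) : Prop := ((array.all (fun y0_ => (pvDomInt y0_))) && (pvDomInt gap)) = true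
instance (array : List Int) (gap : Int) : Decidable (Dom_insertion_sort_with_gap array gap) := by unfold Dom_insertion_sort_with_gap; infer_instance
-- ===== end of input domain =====

-- B replaces A's gapped backward-swap insertion passes by sorting each gap residue-class
-- subsequence with the library sort and reassembling them by index interleaving (a different
-- algorithm); equivalence is about the RETURN value: Python A sorts its argument in place
-- and returns it, B does not mutate its argument.


-- ===== PORT A =====
-- Python helper 'swap(array, src, dest)': in-place swap, returned functionally.
-- pyGetD/pySetD are used at indices A provably keeps in range (0 ≤ j, j+gap < len).
def pvSwap (array : List Int) (src dest : Int) : List Int :=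
  if src == dest then array
  else
    let tmp := PySem.List.pyGetD array src 0
    let array' := PySem.List.pySetD array src (PySem.List.pyGetD array dest 0)
    PySem.List.pySetD array' dest tmp

-- inner loop 'for j in range(i-gap, -1, -gap): …' with continue/break
def pvInnerLoop (gap : Int) : List Int → List Int → List Int
  | array, [] => array
  | array, j :: js =>
    if j + gap ≥ (array.length : Int) then pvInnerLoop gap array js          -- continue
    else if PySem.List.pyGetD array j 0 < PySem.List.pyGetD array (j + gap) 0 then array  -- break
    else pvInnerLoop gap (pvSwap array j (j + gap)) js

def insertion_sort_with_gap (array : List Int) (gap : Int) : List Int :=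
  (PySem.List.pyRange 0 (array.length : Int) 1).foldl
    (fun arr i => pvInnerLoop gap arr (PySem.List.pyRange (i - gap) (-1) (-gap))) array

-- ===== PORT B =====
def insertion_sort_with_gap_alt (array : List Int) (gap : Int) : List Int :=
  if gap ≤ 0 then array
  else
    -- chains = [sorted(array[r::gap]) for r in range(gap)]  (slice? is none only for step 0; gap > 0 here)
    let chains := (PySem.List.pyRange 0 (min gap (array.length : Int)) 1).map
      (fun r => PySem.List.sorted ((PySem.List.slice? array (some r) none gap).getD []) (fun x => x) false)
    -- [chains[i % gap][i // gap] for i in range(len(array))]  (indices provably in range)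
    (PySem.List.pyRange 0 (array.length : Int) 1).map
      (fun i => PySem.List.pyGetD (PySem.List.pyGetD chains (PySem.Int.mod i gap) [])
                  (PySem.Int.floordiv i gap) 0)

-- ===== PRECONDITION & SPEC =====
-- Pre_ excludes exactly gap = 0, where Python A raises ValueError (range() arg 3 must not be zero).
def Pre_insertion_sort_with_gap (array : List Int) (gap : Int) : Prop := gap ≠ 0
instance (array : List Int) (gap : Int) : Decidable (Pre_insertion_sort_with_gap array gap) := by unfold Pre_insertion_sort_with_gap; infer_instance
def pvWitness_insertion_sort_with_gap : List Int × Int := ([5, 1, 4, 2, 3], 2)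

def Spec_insertion_sort_with_gap (array : List Int) (gap : Int) (out : List Int) : Prop := out = insertion_sort_with_gap_alt array gap
instance (array : List Int) (gap : Int) (out : List Int) : Decidable (Spec_insertion_sort_with_gap array gap out) := by unfold Spec_insertion_sort_with_gap; infer_instance

-- ===== CLAIM (what is proved, stated in full; the proofs are below) =====
def Claim_equal_insertion_sort_with_gap : Prop := ∀ (array : List Int) (gap : Int), Dom_insertion_sort_with_gap array gap → Pre_insertion_sort_with_gap array gap → Spec_insertion_sort_with_gap array gap (insertion_sort_with_gap array gap)
-- ===== LEMMAS AND PROOFS =====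

-- ===== counting =====
def pvCnt (g n r : Nat) : Nat := (n - r + g - 1) / g

theorem pvLt_cnt_iff {g : Nat} (hg : 0 < g) (n r m : Nat) :
    m < pvCnt g n r ↔ m * g + r < n := by
  unfold pvCnt
  rw [show (m < (n - r + g - 1) / g ↔ m + 1 ≤ (n - r + g - 1) / g) from Iff.rfl,
      Nat.le_div_iff_mul_le hg]
  have h : (m + 1) * g = m * g + g := by ring
  omega

theorem pvCnt_mono {g : Nat} (hg : 0 < g) (n r : Nat) :
    pvCnt g n r ≤ pvCnt g (n + 1) r := by
  by_contra h
  push_neg at h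
  have h1 := (pvLt_cnt_iff hg (n+1) r (pvCnt g (n+1) r)).not
  have h2 := (pvLt_cnt_iff hg n r (pvCnt g (n+1) r)).mp (by omega)
  omega

theorem pvCnt_self {g : Nat} (hg : 0 < g) (I : Nat) : pvCnt g I (I % g) = I / g := by
  have hmod : g * (I / g) + I % g = I := Nat.div_add_mod I g
  have hlt : I % g < g := Nat.mod_lt _ hg
  have h1 : I - I % g + g - 1 = g * (I / g) + (g - 1) := by omega
  have h2 : (g - 1) / g = 0 := Nat.div_eq_of_lt (by omega)
  unfold pvCnt
  rw [h1, Nat.mul_add_div hg, h2]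
  omega

theorem pvCnt_self_succ {g : Nat} (hg : 0 < g) (I : Nat) :
    pvCnt g (I + 1) (I % g) = I / g + 1 := by
  have hmod : g * (I / g) + I % g = I := Nat.div_add_mod I g
  have hlt : I % g < g := Nat.mod_lt _ hg
  have h0 : g * (I / g + 1) = g * (I / g) + g := by ring
  have h1 : I + 1 - I % g + g - 1 = g * (I / g + 1) := by omega
  unfold pvCnt
  rw [h1, Nat.mul_div_cancel_left _ hg]

theorem pvCnt_other {g : Nat} (hg : 0 < g) (I r : Nat) (hr : r < g) (hne : r ≠ I % g) :
    pvCnt g (I + 1) r = pvCnt g I r := by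
  refine Nat.le_antisymm ?_ (pvCnt_mono hg I r)
  by_contra h
  push_neg at h
  set m := pvCnt g I r with hm
  have h1 : m * g + r < I + 1 := (pvLt_cnt_iff hg (I+1) r m).mp h
  have h2 : ¬ m * g + r < I := by
    have := (pvLt_cnt_iff hg I r m).not.mp (by omega)
    omega
  have heq : m * g + r = I := by omega
  have : I % g = r := by
    rw [← heq, Nat.mul_add_mod' m g r]
    exact Nat.mod_eq_of_lt hr
  omega

-- ===== chains =====
def pvChain (g : Nat) (l : List Int) (r : Nat) : List Int :=
  (List.range (pvCnt g l.length r)).map (fun m => l.getD (m * g + r) 0)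

theorem pvChain_length (g : Nat) (l : List Int) (r : Nat) :
    (pvChain g l r).length = pvCnt g l.length r := by simp [pvChain]

theorem pvChain_getD {g : Nat} (l : List Int) (r m : Nat) (h : m < pvCnt g l.length r) :
    (pvChain g l r).getD m 0 = l.getD (m * g + r) 0 := by
  simp [pvChain, List.getD_eq_getElem?_getD, List.getElem?_map, List.getElem?_range h]

theorem pvGetD_chain {g : Nat} (hg : 0 < g) (l : List Int) (i : Nat) (hi : i < l.length) :
    (pvChain g l (i % g)).getD (i / g) 0 = l.getD i 0 := by
  have h : i / g * g + i % g = i := Nat.div_add_mod' i g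
  rw [pvChain_getD _ _ _ ?_, h]
  rw [pvLt_cnt_iff hg, h]
  exact hi

theorem pvChain_set_ne {g : Nat} (l : List Int) (a : Nat) (v : Int)
    (r : Nat) (hr : r < g) (hne : a % g ≠ r) :
    pvChain g (l.set a v) r = pvChain g l r := by
  unfold pvChain
  rw [List.length_set]
  apply List.map_congr_left
  intro m hm
  have hma : a ≠ m * g + r := by
    intro h
    apply hne
    rw [h, Nat.mul_add_mod' m g r, Nat.mod_eq_of_lt hr]
  rw [List.getD_eq_getElem?_getD, List.getD_eq_getElem?_getD, List.getElem?_set_ne hma]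

theorem pvChain_set_eq {g : Nat} (hg : 0 < g) (l : List Int) (a : Nat) (v : Int)
    (ha : a < l.length) (r : Nat) (heq : a % g = r) :
    pvChain g (l.set a v) r = (pvChain g l r).set (a / g) v := by
  have hr : r < g := heq ▸ Nat.mod_lt _ hg
  have hmod : a / g * g + a % g = a := Nat.div_add_mod' a g
  apply List.ext_getElem (by simp [pvChain_length])
  intro m hm hm'
  have hmcnt : m < pvCnt g l.length r := by simpa [pvChain_length] using hm
  have hmn : m * g + r < l.length := (pvLt_cnt_iff hg _ _ _).mp hmcnt
  simp only [pvChain, List.length_set, List.getElem_map, List.getElem_range,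
    List.getElem_set]
  split_ifs with h
  · have hma : m * g + r = a := by rw [← h]; omega
    rw [hma, List.getD_eq_getElem?_getD, List.getElem?_set_self']
    simp [ha]
  · have hne2 : a ≠ m * g + r := by
      intro hc
      apply h
      have h2 : a / g * g = m * g := by omega
      exact Nat.eq_of_mul_eq_mul_right hg h2
    rw [List.getD_eq_getElem?_getD, List.getD_eq_getElem?_getD, List.getElem?_set_ne hne2]

-- ===== swaps =====
def pvSwapAdj (c : List Int) (m : Nat) : List Int :=
  (c.set m (c.getD (m+1) 0)).set (m+1) (c.getD m 0)

theorem pvSwap_eq (l : List Int) (j d : Nat) (hne : j ≠ d) :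
    pvSwap l (j : Int) (d : Int) = (l.set j (l.getD d 0)).set d (l.getD j 0) := by
  unfold pvSwap
  have hb : ((j : Int) == (d : Int)) = false := by
    simp only [beq_eq_false_iff_ne, ne_eq, Int.natCast_inj]
    exact hne
  simp [hb, PySem.List.pyGetD_natCast, PySem.List.pySetD_natCast]

theorem pvChain_swap {g : Nat} (hg : 0 < g) (l : List Int) (m r : Nat) (hr : r < g)
    (h : (m+1)*g + r < l.length) :
    ∀ r' < g, pvChain g (pvSwap l ((m*g+r : Nat) : Int) (((m+1)*g+r : Nat) : Int)) r' =
      if r' = r then pvSwapAdj (pvChain g l r) m else pvChain g l r' := by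
  have hgm : (m+1)*g = m*g + g := by ring
  have hlt1 : m*g + r < l.length := by omega
  have hne : (m*g+r) ≠ ((m+1)*g+r) := by omega
  have hm1 : (m*g+r) % g = r := by rw [Nat.mul_add_mod' m g r, Nat.mod_eq_of_lt hr]
  have hm2 : ((m+1)*g+r) % g = r := by rw [Nat.mul_add_mod' (m+1) g r, Nat.mod_eq_of_lt hr]
  have hd1 : (m*g+r) / g = m := by
    have e : m*g+r = g*m+r := by ring
    rw [e, Nat.mul_add_div hg, Nat.div_eq_of_lt hr, Nat.add_zero]
  have hd2 : ((m+1)*g+r) / g = m+1 := by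
    have e : (m+1)*g+r = g*(m+1)+r := by ring
    rw [e, Nat.mul_add_div hg, Nat.div_eq_of_lt hr, Nat.add_zero]
  have hm_cnt : m < pvCnt g l.length r := (pvLt_cnt_iff hg _ _ _).mpr (by omega)
  have hm1_cnt : m+1 < pvCnt g l.length r := (pvLt_cnt_iff hg _ _ _).mpr h
  intro r' hr'
  rw [pvSwap_eq l _ _ hne]
  by_cases hc : r' = r
  · subst hc
    rw [pvChain_set_eq hg _ _ _ (by simpa using h) r' hm2,
        pvChain_set_eq hg l _ _ hlt1 r' hm1, hd1, hd2]
    unfold pvSwapAdj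
    rw [pvChain_getD _ _ _ hm_cnt, pvChain_getD _ _ _ hm1_cnt, if_pos rfl]
  · rw [pvChain_set_ne _ _ _ _ hr' (by rw [hm2]; exact fun hh => hc hh.symm),
        pvChain_set_ne _ _ _ _ hr' (by rw [hm1]; exact fun hh => hc hh.symm),
        if_neg hc]

-- ===== chain-level bubble pass =====
def pvCbub : List Int → List Nat → List Int
  | c, [] => c
  | c, m :: ms => if c.getD m 0 < c.getD (m+1) 0 then c else pvCbub (pvSwapAdj c m) ms

theorem pvInner_sim {g : Nat} (hg : 0 < g) (r : Nat) (hr : r < g) (ms : List Nat) :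
    ∀ (l : List Int), (∀ m ∈ ms, (m+1)*g + r < l.length) →
      (pvInnerLoop (g : Int) l (ms.map (fun m => ((m*g+r : Nat) : Int)))).length = l.length ∧
      ∀ r' < g, pvChain g (pvInnerLoop (g : Int) l (ms.map (fun m => ((m*g+r : Nat) : Int)))) r' =
        if r' = r then pvCbub (pvChain g l r) ms else pvChain g l r' := by
  induction ms with
  | nil =>
    intro l _
    refine ⟨rfl, ?_⟩
    intro r' hr'
    show pvChain g l r' = _
    simp only [pvCbub]
    split_ifs with hc
    · rw [hc]
    · rfl
  | cons m ms ih =>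
    intro l hms
    have hgm : (m+1)*g = m*g + g := by ring
    have hmn : (m+1)*g + r < l.length := hms m (by simp)
    have hmg : ((m*g+r : Nat) : Int) + (g : Int) = (((m+1)*g+r : Nat) : Int) := by
      push_cast; ring
    have hguard : ¬ ((((m*g+r : Nat)) : Int) + (g : Int) ≥ (l.length : Int)) := by
      rw [hmg]
      exact not_le.mpr (by exact_mod_cast hmn)
    have hm_cnt : m < pvCnt g l.length r := (pvLt_cnt_iff hg _ _ _).mpr (by omega)
    have hm1_cnt : m+1 < pvCnt g l.length r := (pvLt_cnt_iff hg _ _ _).mpr hmn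
    have hget1 : PySem.List.pyGetD l ((m*g+r : Nat) : Int) 0 = (pvChain g l r).getD m 0 := by
      rw [PySem.List.pyGetD_natCast, pvChain_getD _ _ _ hm_cnt]
    have hget2 : PySem.List.pyGetD l (((m*g+r : Nat) : Int) + (g : Int)) 0
        = (pvChain g l r).getD (m+1) 0 := by
      rw [hmg, PySem.List.pyGetD_natCast, pvChain_getD _ _ _ hm1_cnt]
    simp only [List.map_cons, pvInnerLoop]
    rw [if_neg hguard, hget1, hget2]
    by_cases hlt : (pvChain g l r).getD m 0 < (pvChain g l r).getD (m+1) 0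
    · rw [if_pos hlt]
      refine ⟨rfl, ?_⟩
      intro r' hr'
      simp only [pvCbub, if_pos hlt]
      split_ifs with hc
      · rw [hc]
      · rfl
    · rw [if_neg hlt, hmg]
      have hne : (m*g+r) ≠ ((m+1)*g+r) := by omega
      have hswl : (pvSwap l ((m*g+r : Nat) : Int) (((m+1)*g+r : Nat) : Int)).length
          = l.length := by
        rw [pvSwap_eq _ _ _ hne]; simp
      have ihs := ih (pvSwap l ((m*g+r : Nat) : Int) (((m+1)*g+r : Nat) : Int))
        (by intro m' hm'; rw [hswl]; exact hms m' (List.mem_cons_of_mem _ hm'))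
      refine ⟨by rw [ihs.1, hswl], ?_⟩
      intro r' hr'
      rw [ihs.2 r' hr']
      have hcs := pvChain_swap hg l m r hr hmn
      split_ifs with hc
      · subst hc
        rw [hcs r' hr', if_pos rfl]
        simp only [pvCbub, if_neg hlt]
      · rw [hcs r' hr', if_neg hc]

-- ===== descending position list and range translation =====
def pvDesc (k : Nat) : List Nat := (List.range k).map (fun t => k - 1 - t)

theorem pvDesc_succ (k : Nat) : pvDesc (k+1) = k :: pvDesc k := by
  unfold pvDesc
  rw [List.range_succ_eq_map]
  simp only [List.map_cons, List.map_map]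
  refine congrArg₂ _ (by omega) (List.map_congr_left ?_)
  intro t _
  simp only [Function.comp]
  omega

theorem pvDesc_mem {k m : Nat} (h : m ∈ pvDesc k) : m < k := by
  unfold pvDesc at h
  obtain ⟨t, ht, rfl⟩ := List.mem_map.mp h
  have := List.mem_range.mp ht
  omega

theorem pvRange_desc {g : Nat} (hg : 0 < g) (k r : Nat) (hr : r < g) :
    PySem.List.pyRange (((k*g+r : Nat) : Int) - (g : Int)) (-1) (-(g : Int)) =
      (pvDesc k).map (fun m => ((m*g+r : Nat) : Int)) := by
  have hgz : ¬ (-(g : Int) = 0) := by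
    have : (0 : Int) < g := by exact_mod_cast hg
    omega
  have hstep : ¬ ((0 : Int) < -(g : Int)) := by
    have : (0 : Int) < g := by exact_mod_cast hg
    omega
  unfold PySem.List.pyRange
  rw [if_neg hgz, if_neg hstep]
  by_cases hk : k = 0
  · subst hk
    have hc : ¬ ((-1 : Int) < ((0*g+r : Nat) : Int) - g) := by push_cast; omega
    rw [if_neg hc]
    simp [pvDesc]
  · have hc : (-1 : Int) < ((k*g+r : Nat) : Int) - g := by
      have : g ≤ k * g := Nat.le_mul_of_pos_left g (by omega)
      push_cast
      omega
    rw [if_pos hc]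
    have hnum : ((k*g+r : Nat) : Int) - g - -1 + - -(g : Int) - 1 = ((k*g+r : Nat) : Int) := by
      push_cast; ring
    rw [hnum]
    have hdiv : ((k*g+r : Nat) : Int) / (- -(g : Int)) = (k : Int) := by
      rw [neg_neg]
      have h1 : ((k*g+r : Nat) : Int) / (g : Int) = (((k*g+r) / g : Nat) : Int) := by
        norm_cast
      rw [h1]
      have h2 : (k*g+r) / g = k := by
        have e : k*g+r = g*k+r := by ring
        rw [e, Nat.mul_add_div hg, Nat.div_eq_of_lt hr, Nat.add_zero]
      rw [h2]
    rw [hdiv]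
    simp only [Int.toNat_natCast]
    unfold pvDesc
    rw [List.map_map]
    apply List.map_congr_left
    intro t ht
    have htk : t < k := List.mem_range.mp ht
    simp only [Function.comp]
    have hu : k = (k - 1 - t) + t + 1 := by omega
    have e1 : ((k*g+r : Nat) : Int) = (((k-1-t) + t + 1) * g + r : Nat) := by rw [← hu]
    rw [e1]
    push_cast
    ring

theorem pvRange_neg_empty (g i : Int) (hgneg : g < 0) (hi : 0 ≤ i) :
    PySem.List.pyRange (i - g) (-1) (-g) = [] := by
  have hgz : ¬ (-g = 0) := by omega
  have hstep : (0 : Int) < -g := by omega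
  unfold PySem.List.pyRange
  rw [if_neg hgz, if_pos hstep, if_neg (by omega : ¬ (i - g < -1))]
  simp

-- ===== insertion into a sorted prefix (as produced by the bubble pass) =====
def pvInsRev (x : Int) : List Int → List Int
  | [] => [x]
  | a :: ra => if a < x then x :: a :: ra else a :: pvInsRev x ra

theorem pvInsRev_perm (x : Int) (rs : List Int) : (pvInsRev x rs).Perm (x :: rs) := by
  induction rs with
  | nil => simp [pvInsRev]
  | cons a ra ih =>
    simp only [pvInsRev]
    split_ifs with h
    · exact List.Perm.refl _
    · exact (List.Perm.cons a ih).trans (List.Perm.swap x a ra)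

theorem pvInsRev_sorted (x : Int) (rs : List Int) (h : rs.Pairwise (· ≥ ·)) :
    (pvInsRev x rs).Pairwise (· ≥ ·) := by
  induction rs with
  | nil => simp [pvInsRev]
  | cons a ra ih =>
    rcases List.pairwise_cons.mp h with ⟨ha, hra⟩
    simp only [pvInsRev]
    split_ifs with hax
    · refine List.pairwise_cons.mpr ⟨?_, h⟩
      intro b hb
      rcases List.mem_cons.mp hb with hb | hb
      · exact hb ▸ le_of_lt hax
      · exact le_trans (ha b hb) (le_of_lt hax)
    · refine List.pairwise_cons.mpr ⟨?_, ih hra⟩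
      intro b hb
      have hb2 := (pvInsRev_perm x ra).mem_iff.mp hb
      rcases List.mem_cons.mp hb2 with hb2 | hb2
      · exact hb2 ▸ not_lt.mp hax
      · exact ha b hb2

theorem pvSwapAdj_append (q : List Int) (a x : Int) (rest : List Int) :
    pvSwapAdj (q ++ a :: x :: rest) q.length = q ++ x :: a :: rest := by
  unfold pvSwapAdj
  have hga : (q ++ a :: x :: rest).getD q.length 0 = a := by
    rw [List.getD_eq_getElem?_getD, List.getElem?_append_right (le_refl _)]
    simp
  have hgx : (q ++ a :: x :: rest).getD (q.length + 1) 0 = x := by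
    rw [List.getD_eq_getElem?_getD, List.getElem?_append_right (by omega)]
    simp
  rw [hga, hgx]
  rw [List.set_append_right _ _ (le_refl _)]
  simp only [Nat.sub_self, List.set_cons_zero]
  rw [List.set_append_right _ _ (by omega : q.length ≤ q.length + 1)]
  have h1 : q.length + 1 - q.length = 1 := by omega
  rw [h1]
  rfl

theorem pvCbub_surgery (s : List Int) : ∀ (x : Int) (rest : List Int),
    pvCbub (s ++ x :: rest) (pvDesc s.length) = (pvInsRev x s.reverse).reverse ++ rest := by
  induction s using List.reverseRecOn with
  | nil => intro x rest; simp [pvDesc, pvCbub, pvInsRev]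
  | append_singleton q a ih =>
    intro x rest
    have hlen : (q ++ [a]).length = q.length + 1 := by simp
    rw [hlen, pvDesc_succ]
    have hlist : (q ++ [a]) ++ x :: rest = q ++ a :: x :: rest := by simp
    rw [hlist]
    have hga : (q ++ a :: x :: rest).getD q.length 0 = a := by
      rw [List.getD_eq_getElem?_getD, List.getElem?_append_right (le_refl _)]
      simp
    have hgx : (q ++ a :: x :: rest).getD (q.length + 1) 0 = x := by
      rw [List.getD_eq_getElem?_getD, List.getElem?_append_right (by omega)]
      simp
    simp only [pvCbub, hga, hgx]
    rw [List.reverse_append]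
    by_cases hax : a < x
    · rw [if_pos hax]
      simp only [List.reverse_singleton, List.singleton_append, pvInsRev, if_pos hax]
      simp
    · rw [if_neg hax, pvSwapAdj_append, ih x (a :: rest)]
      simp only [List.reverse_singleton, List.singleton_append, pvInsRev, if_neg hax]
      simp

-- ===== chain-level insertion sort =====
def pvIsortStep (c : List Int) (k : Nat) : List Int := pvCbub c (pvDesc k)
def pvIsortPartial (c : List Int) (p : Nat) : List Int := (List.range p).foldl pvIsortStep c

theorem pvIsort_inv (cc : List Int) : ∀ p, p ≤ cc.length → ∃ s : List Int,
    pvIsortPartial cc p = s ++ cc.drop p ∧ s.Perm (cc.take p) ∧ s.Pairwise (· ≤ ·) := by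
  intro p
  induction p with
  | zero => intro _; exact ⟨[], by simp [pvIsortPartial], by simp, by simp⟩
  | succ p ih =>
    intro hp
    obtain ⟨s, he, hperm, hsort⟩ := ih (by omega)
    have hpl : p < cc.length := by omega
    have hslen : s.length = p := by rw [hperm.length_eq, List.length_take]; omega
    have hdrop : cc.drop p = cc[p] :: cc.drop (p+1) := List.drop_eq_getElem_cons hpl
    have hstep : pvIsortPartial cc (p+1) = pvIsortStep (pvIsortPartial cc p) p := by
      unfold pvIsortPartial
      rw [List.range_succ, List.foldl_append]
      rfl
    rw [hstep, he, hdrop]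
    unfold pvIsortStep
    rw [show pvDesc p = pvDesc s.length from by rw [hslen],
        pvCbub_surgery s (cc[p]) (cc.drop (p+1))]
    refine ⟨(pvInsRev (cc[p]) s.reverse).reverse, rfl, ?_, ?_⟩
    · have h1 : (pvInsRev (cc[p]) s.reverse).reverse.Perm ((cc[p]) :: s.reverse) :=
        (List.reverse_perm _).trans (pvInsRev_perm _ _)
      have htake : cc.take (p+1) = cc.take p ++ [cc[p]] := by
        rw [List.take_succ]
        simp [List.getElem?_eq_getElem hpl]
      rw [htake]
      refine h1.trans ?_
      refine (List.Perm.cons (cc[p]) ((s.reverse_perm).trans hperm)).trans ?_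
      exact (List.perm_append_singleton (cc[p]) (cc.take p)).symm
    · rw [List.pairwise_reverse]
      apply pvInsRev_sorted
      rw [List.pairwise_reverse]
      exact hsort.imp (fun h => h)

-- ===== outer loop =====
def pvOuterF (g : Nat) (arr : List Int) (i : Nat) : List Int :=
  pvInnerLoop (g : Int) arr (PySem.List.pyRange ((i : Int) - (g : Int)) (-1) (-(g : Int)))

theorem pvOuter_sim {g : Nat} (hg : 0 < g) (l0 : List Int) :
    ∀ I, I ≤ l0.length →
      ((List.range I).foldl (pvOuterF g) l0).length = l0.length ∧
      ∀ r < g, pvChain g ((List.range I).foldl (pvOuterF g) l0) r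
        = pvIsortPartial (pvChain g l0 r) (pvCnt g I r) := by
  intro I
  induction I with
  | zero =>
    intro _
    refine ⟨rfl, ?_⟩
    intro r hr
    have h0 : pvCnt g 0 r = 0 := by
      unfold pvCnt
      have e : 0 - r + g - 1 = g - 1 := by omega
      rw [e]
      exact Nat.div_eq_of_lt (by omega)
    rw [h0]
    rfl
  | succ I ih =>
    intro hI
    obtain ⟨hlen, hch⟩ := ih (by omega)
    have hfold : (List.range (I+1)).foldl (pvOuterF g) l0
        = pvOuterF g ((List.range I).foldl (pvOuterF g) l0) I := by
      rw [List.range_succ, List.foldl_append]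
      rfl
    set X := (List.range I).foldl (pvOuterF g) l0 with hX
    have hr0g : I % g < g := Nat.mod_lt _ hg
    have hkI : I / g * g + I % g = I := Nat.div_add_mod' I g
    have hIlen : I < l0.length := by omega
    have hstep : pvOuterF g X I
        = pvInnerLoop (g : Int) X ((pvDesc (I / g)).map (fun m => ((m*g+(I % g) : Nat) : Int))) := by
      unfold pvOuterF
      rw [show ((I : Nat) : Int) = (((I / g)*g+(I % g) : Nat) : Int) by rw [hkI],
          pvRange_desc hg (I / g) (I % g) hr0g]
    have hms : ∀ m ∈ pvDesc (I / g), (m+1)*g + (I % g) < X.length := by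
      intro m hm
      have hmk : m < I / g := pvDesc_mem hm
      have h2 : (m+1)*g ≤ (I / g)*g := Nat.mul_le_mul_right g (by omega)
      rw [hlen]
      omega
    have hsim := pvInner_sim hg (I % g) hr0g (pvDesc (I / g)) X hms
    rw [hfold, hstep]
    refine ⟨by rw [hsim.1, hlen], ?_⟩
    intro r hr
    rw [hsim.2 r hr]
    by_cases hc : r = I % g
    · rw [if_pos hc, hc, hch (I % g) hr0g]
      have e1 : pvCnt g I (I % g) = I / g := pvCnt_self hg I
      have e2 : pvCnt g (I+1) (I % g) = I / g + 1 := pvCnt_self_succ hg I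
      rw [e1, e2]
      have e3 : pvIsortPartial (pvChain g l0 (I % g)) (I / g + 1)
          = pvCbub (pvIsortPartial (pvChain g l0 (I % g)) (I / g)) (pvDesc (I / g)) := by
        unfold pvIsortPartial
        rw [List.range_succ, List.foldl_append]
        rfl
      rw [e3]
    · rw [if_neg hc, hch r hr, pvCnt_other hg I r hr hc]

theorem pvIsort_full (cc : List Int) :
    pvIsortPartial cc cc.length = PySem.List.sorted cc (fun x => x) false := by
  obtain ⟨s, he, hperm, hsort⟩ := pvIsort_inv cc cc.length (le_refl _)
  rw [he, List.drop_length, List.append_nil]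
  rw [List.take_length] at hperm
  exact (PySem.List.sorted_id_eq_of_perm_of_pairwise cc s hperm hsort).symm

-- ===== A characterized by its chains =====
theorem pvA_chains {gap : Int} (hpos : 0 < gap) (l : List Int) :
    (insertion_sort_with_gap l gap).length = l.length ∧
    ∀ r < gap.toNat, pvChain gap.toNat (insertion_sort_with_gap l gap) r
      = PySem.List.sorted (pvChain gap.toNat l r) (fun x => x) false := by
  have hg : 0 < gap.toNat := by omega
  have hgap : ((gap.toNat : Nat) : Int) = gap := Int.toNat_of_nonneg (le_of_lt hpos)
  have hA : insertion_sort_with_gap l gap = (List.range l.length).foldl (pvOuterF gap.toNat) l := by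
    unfold insertion_sort_with_gap
    rw [← hgap, PySem.List.pyRange_zero_natCast, List.foldl_map]
    rfl
  obtain ⟨h1, h2⟩ := pvOuter_sim hg l l.length (le_refl _)
  constructor
  · rw [hA]
    exact h1
  · intro r hr
    rw [hA, h2 r hr]
    have e : pvCnt gap.toNat l.length r = (pvChain gap.toNat l r).length :=
      (pvChain_length _ _ _).symm
    rw [e, pvIsort_full]

-- ===== B computed =====
theorem pvSlice_chain {g : Nat} (hg : 0 < g) (l : List Int) (r : Nat) (hr : r < g) :
    (PySem.List.slice? l (some (r : Int)) none (g : Int)).getD [] = pvChain g l r := by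
  have hgz : ¬ ((g : Int) = 0) := by omega
  have hsn : ¬ ((g : Int) < 0) := by omega
  have hrn : ¬ ((r : Int) < 0) := by omega
  have hsp : (0 : Int) < (g : Int) := by omega
  unfold PySem.List.slice? PySem.List.sliceIndices
  rw [if_neg hgz]
  simp only [if_neg hsn, if_neg hrn, hsp, if_pos hsp, Option.getD_some]
  by_cases hcase : r < l.length
  · have hmin : min ((r : Nat) : Int) ((l.length : Nat) : Int) = ((r : Nat) : Int) :=
      min_eq_left (by exact_mod_cast le_of_lt hcase)
    rw [hmin, if_pos (show ((r : Nat) : Int) < ((l.length : Nat) : Int) by exact_mod_cast hcase)]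
    have hcnt : (((l.length : Int) - (r : Int) + (g : Int) - 1) / (g : Int)).toNat
        = pvCnt g l.length r := by
      have e1 : ((l.length : Int) - (r : Int) + (g : Int) - 1)
          = ((l.length - r + g - 1 : Nat) : Int) := by push_cast; omega
      rw [e1]
      norm_cast
    rw [hcnt]
    rw [List.filterMap_congr (g := fun k => some (l.getD (k*g+r) 0)) ?_]
    · rw [show (fun k : Nat => some (l.getD (k*g+r) 0))
            = some ∘ (fun k : Nat => l.getD (k*g+r) 0) from rfl,
          List.filterMap_eq_map]
      rfl
    · intro k hk
      have hkc : k < pvCnt g l.length r := List.mem_range.mp hk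
      have hklt : k*g+r < l.length := (pvLt_cnt_iff hg _ _ _).mp hkc
      have hidx : ((r : Int) + (g : Int) * (k : Int)).toNat = k*g+r := by
        have e : ((r : Int) + (g : Int) * (k : Int)) = ((k*g+r : Nat) : Int) := by
          push_cast; ring
        rw [e, Int.toNat_natCast]
      show (l[((r : Int) + (g : Int) * (k : Int)).toNat]? ) = some (l.getD (k*g+r) 0)
      rw [hidx, List.getElem?_eq_getElem hklt, List.getD_eq_getElem l 0 hklt]
  · have hmin : min ((r : Nat) : Int) ((l.length : Nat) : Int) = ((l.length : Nat) : Int) :=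
      min_eq_right (by exact_mod_cast le_of_not_gt hcase)
    rw [hmin, if_neg (by omega : ¬ ((l.length : Int) < (l.length : Int)))]
    have h0 : pvCnt g l.length r = 0 := by
      unfold pvCnt
      have e : l.length - r + g - 1 = g - 1 := by omega
      rw [e]
      exact Nat.div_eq_of_lt (by omega)
    unfold pvChain
    rw [h0]
    rfl

theorem pvB_pos {gap : Int} (hpos : 0 < gap) (l : List Int) :
    insertion_sort_with_gap_alt l gap = (List.range l.length).map
      (fun i => (PySem.List.sorted (pvChain gap.toNat l (i % gap.toNat)) (fun x => x) false).getD
        (i / gap.toNat) 0) := by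
  obtain ⟨g, rfl⟩ : ∃ g : Nat, gap = (g : Int) :=
    ⟨gap.toNat, (Int.toNat_of_nonneg (le_of_lt hpos)).symm⟩
  have hg : 0 < g := by exact_mod_cast hpos
  simp only [Int.toNat_natCast]
  unfold insertion_sort_with_gap_alt
  rw [if_neg (not_le.mpr hpos),
      (by push_cast; rfl : min ((g : Nat) : Int) ((l.length : Nat) : Int)
          = ((min g l.length : Nat) : Int)),
      PySem.List.pyRange_zero_natCast l.length, List.map_map]
  refine List.map_congr_left ?_
  intro i hi
  have hin : i < l.length := List.mem_range.mp hi
  have hmodmin : i % g < min g l.length :=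
    lt_min (Nat.mod_lt i hg) (Nat.lt_of_le_of_lt (Nat.mod_le i g) hin)
  simp only [Function.comp]
  rw [PySem.Int.mod_natCast, PySem.Int.floordiv_natCast,
      PySem.List.pyGetD_map_pyRange _ _ _ _ hmodmin,
      PySem.List.pyGetD_natCast,
      pvSlice_chain hg l (i % g) (Nat.mod_lt i hg)]

-- ===== final equivalences =====
theorem pvEq_pos {gap : Int} (hpos : 0 < gap) (l : List Int) :
    insertion_sort_with_gap l gap = insertion_sort_with_gap_alt l gap := by
  have hg : 0 < gap.toNat := by omega
  obtain ⟨hlen, hchains⟩ := pvA_chains hpos l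
  rw [pvB_pos hpos l]
  apply List.ext_getElem (by simp [hlen])
  intro i h1 h2
  have hi : i < l.length := by rw [← hlen]; exact h1
  have e1 := pvGetD_chain hg (insertion_sort_with_gap l gap) i (by rw [hlen]; exact hi)
  rw [hchains (i % gap.toNat) (Nat.mod_lt i hg)] at e1
  rw [List.getD_eq_getElem _ 0 h1] at e1
  simp only [List.getElem_map, List.getElem_range]
  exact e1.symm

theorem pvEq_neg {gap : Int} (hneg : gap < 0) (l : List Int) :
    insertion_sort_with_gap l gap = insertion_sort_with_gap_alt l gap := by
  unfold insertion_sort_with_gap insertion_sort_with_gap_alt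
  rw [if_pos (le_of_lt hneg)]
  rw [PySem.List.foldl_congr_mem _ _ (fun arr _ => arr) _ ?_]
  · exact PySem.List.foldl_ignore _ _
  · intro acc i hi
    have h0 : (0 : Int) ≤ i := (PySem.List.mem_pyRange_one.mp hi).1
    rw [pvRange_neg_empty gap i hneg h0]
    rfl

-- ===== VERDICT (by name: the statement is the Claim_ definition above) =====
theorem insertion_sort_with_gap_spec : Claim_equal_insertion_sort_with_gap := by
  intro array gap _ hpre
  have hne : gap ≠ 0 := hpre
  unfold Spec_insertion_sort_with_gap
  rcases lt_trichotomy gap 0 with h | h | h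
  · exact pvEq_neg h array
  · exact absurd h hne
  · exact pvEq_pos h array
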